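-- pv_equiv track=rewrite | github.com/jasonheldman-creator/Waves-Simple | analyze_price_coverage.py | categorize_missing_tickers
-- ===== SOURCE A (Python) =====
-- from typing import Dict, List, Set, Tuple
--
-- def categorize_missing_tickers(missing: Set[str]) -> Dict[str, List[str]]:
--     """
--     Categorize missing tickers by type.
--
--     Returns:
--         Dict mapping category to list of tickers
--     """
--     categories = {
--         'crypto': [],
--         'equity': [],
--         'etf': [],
--         'other': []
--     }
--
--     for ticker in missing:
--         if '-USD' in ticker or ticker.startswith('BTC') or ticker.startswith('ETH'):
--             categories['crypto'].append(ticker)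
--         elif ticker.isupper() and len(ticker) <= 5 and '-' not in ticker:
--             # Likely an equity
--             if ticker in ['SPY', 'QQQ', 'IWM', 'IWV', 'DIA', 'AGG', 'TLT', 'GLD',
--                           'ICLN', 'XLE', 'XLI', 'BIL', 'SHY', 'IEF', 'MUB', 'SUB',
--                           'SGOV', 'SMH', 'TAN', 'PAVE', 'ARKK', 'IJH', 'IWO', 'IWP',
--                           'MDY', 'DVY', 'VBK', 'VGT', 'VTV', 'VTWO', 'VYM', 'HDV',
--                           'SCHD', 'NOBL', 'SHM', 'HYD', 'HYG', 'LQD', 'BND']: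
--                 categories['etf'].append(ticker)
--             else:
--                 categories['equity'].append(ticker)
--         else:
--             categories['other'].append(ticker)
--
--     # Sort each category
--     for cat in categories:
--         categories[cat] = sorted(categories[cat])
--
--     return categories
-- ===== SOURCE B (Python) =====
-- _ETFS = frozenset(('SPY', 'QQQ', 'IWM', 'IWV', 'DIA', 'AGG', 'TLT', 'GLD',
--                    'ICLN', 'XLE', 'XLI', 'BIL', 'SHY', 'IEF', 'MUB', 'SUB',
--                    'SGOV', 'SMH', 'TAN', 'PAVE', 'ARKK', 'IJH', 'IWO', 'IWP',
--                    'MDY', 'DVY', 'VBK', 'VGT', 'VTV', 'VTWO', 'VYM', 'HDV',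
--                    'SCHD', 'NOBL', 'SHM', 'HYD', 'HYG', 'LQD', 'BND'))
--
-- _CATEGORIES = ('crypto', 'equity', 'etf', 'other')
--
--
-- def _category(ticker):
--     """Return the category name of a single ticker."""
--     if '-USD' in ticker or ticker.startswith('BTC') or ticker.startswith('ETH'):
--         return 'crypto'
--     if ticker.isupper() and len(ticker) <= 5 and '-' not in ticker:
--         return 'etf' if ticker in _ETFS else 'equity'
--     return 'other'
--
--
-- def categorize_missing_tickers(missing):
--     """Categorize missing tickers by type: a key function plus one
--     filter-and-sort comprehension per category, instead of a branching
--     bucketing loop followed by a per-bucket sorting pass."""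
--     return {c: sorted(t for t in missing if _category(t) == c)
--             for c in _CATEGORIES}
-- ===== Notes on version B (the rewrite author's own statement) =====
-- stated objective: simpler
-- what changed: B replaces A's single bucketing loop with if/elif branches plus a per-bucket sorting pass by a pure key function _category and a dict comprehension that, for each of the four fixed categories, filters the input by key and sorts it (staged per-category passes instead of one accumulator pass).
import Mathlib
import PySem

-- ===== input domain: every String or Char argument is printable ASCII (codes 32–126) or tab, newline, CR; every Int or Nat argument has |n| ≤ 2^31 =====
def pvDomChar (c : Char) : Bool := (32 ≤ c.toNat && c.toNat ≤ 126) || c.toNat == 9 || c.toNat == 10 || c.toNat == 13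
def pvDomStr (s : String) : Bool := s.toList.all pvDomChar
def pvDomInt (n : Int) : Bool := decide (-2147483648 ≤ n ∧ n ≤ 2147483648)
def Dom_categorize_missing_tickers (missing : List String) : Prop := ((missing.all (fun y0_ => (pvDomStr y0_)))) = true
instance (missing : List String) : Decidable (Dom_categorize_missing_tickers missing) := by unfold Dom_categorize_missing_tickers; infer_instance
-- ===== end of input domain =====

-- B replaces A's bucketing loop plus per-bucket sorting pass by a key function and, for each
-- fixed category, one filter-by-key-and-sort pass; return values proved equal.

-- hand port of Python str.isupper(): at least one cased character and no lowercase one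
-- (exact on the ASCII domain, where the cased characters are exactly the letters)
def pvIsUpperStr (s : String) : Bool :=
  s.toList.any PySem.Chars.isupper && s.toList.all (fun c => !PySem.Chars.islower c)

-- the ETF ticker list from A's source (B's module constant _ETFS holds the same strings)
def pvETFList : List String :=
  ["SPY", "QQQ", "IWM", "IWV", "DIA", "AGG", "TLT", "GLD",
   "ICLN", "XLE", "XLI", "BIL", "SHY", "IEF", "MUB", "SUB",
   "SGOV", "SMH", "TAN", "PAVE", "ARKK", "IJH", "IWO", "IWP",
   "MDY", "DVY", "VBK", "VGT", "VTV", "VTWO", "VYM", "HDV",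
   "SCHD", "NOBL", "SHM", "HYD", "HYG", "LQD", "BND"]

-- ===== PORT A =====
def categorize_missing_tickers (missing : List String) : List (String × List String) :=
  let categories : PySem.Dict String (List String) :=
    ((((PySem.Dict.empty).insert "crypto" []).insert "equity" []).insert "etf" []).insert "other" []
  let categories := missing.foldl (fun d ticker =>
    if PySem.Str.isIn "-USD" ticker || PySem.Str.startswith ticker "BTC" || PySem.Str.startswith ticker "ETH" then
      d.modify "crypto" [] (fun l => l ++ [ticker])
    else if pvIsUpperStr ticker && decide (PySem.Str.len ticker ≤ 5) && !PySem.Str.isIn "-" ticker then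
      if pvETFList.contains ticker then
        d.modify "etf" [] (fun l => l ++ [ticker])
      else
        d.modify "equity" [] (fun l => l ++ [ticker])
    else
      d.modify "other" [] (fun l => l ++ [ticker])) categories
  let categories := categories.keys.foldl (fun d cat =>
    d.modify cat [] (fun l => PySem.List.sorted l (fun x => x) false)) categories
  categories.items

-- ===== PORT B =====
-- port of Source B's helper _category
def pvCategory (ticker : String) : String :=
  if PySem.Str.isIn "-USD" ticker || PySem.Str.startswith ticker "BTC" || PySem.Str.startswith ticker "ETH" then
    "crypto"
  else if pvIsUpperStr ticker && decide (PySem.Str.len ticker ≤ 5) && !PySem.Str.isIn "-" ticker then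
    if pvETFList.contains ticker then "etf" else "equity"
  else
    "other"

-- Source B's dict comprehension over the fixed category tuple
def categorize_missing_tickers_alt (missing : List String) : List (String × List String) :=
  ["crypto", "equity", "etf", "other"].map (fun c =>
    (c, PySem.List.sorted (missing.filter (fun t => pvCategory t == c)) (fun x => x) false))

-- ===== PRECONDITION & SPEC =====
def Spec_categorize_missing_tickers (missing : List String) (out : List (String × List String)) : Prop := out = categorize_missing_tickers_alt missing
instance (missing : List String) (out : List (String × List String)) : Decidable (Spec_categorize_missing_tickers missing out) := by unfold Spec_categorize_missing_tickers; infer_instance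

-- ===== CLAIM (what is proved, stated in full; the proofs are below) =====
def Claim_equal_categorize_missing_tickers : Prop := ∀ (missing : List String), Dom_categorize_missing_tickers missing → Spec_categorize_missing_tickers missing (categorize_missing_tickers missing)

-- ===== LEMMAS AND PROOFS =====

-- the four classification predicates of A's branches
def pvPC (t : String) : Bool :=
  PySem.Str.isIn "-USD" t || PySem.Str.startswith t "BTC" || PySem.Str.startswith t "ETH"
def pvPEq (t : String) : Bool :=
  !pvPC t && ((pvIsUpperStr t && decide (PySem.Str.len t ≤ 5) && !PySem.Str.isIn "-" t) && !pvETFList.contains t)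
def pvPF (t : String) : Bool :=
  !pvPC t && ((pvIsUpperStr t && decide (PySem.Str.len t ≤ 5) && !PySem.Str.isIn "-" t) && pvETFList.contains t)
def pvPO (t : String) : Bool :=
  !pvPC t && !(pvIsUpperStr t && decide (PySem.Str.len t ≤ 5) && !PySem.Str.isIn "-" t)

lemma loopA (xs : List String) : ∀ (c e f o : List String),
    xs.foldl (fun d ticker =>
      if PySem.Str.isIn "-USD" ticker || PySem.Str.startswith ticker "BTC" || PySem.Str.startswith ticker "ETH" then
        d.modify "crypto" [] (fun l => l ++ [ticker])
      else if pvIsUpperStr ticker && decide (PySem.Str.len ticker ≤ 5) && !PySem.Str.isIn "-" ticker then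
        if pvETFList.contains ticker then
          d.modify "etf" [] (fun l => l ++ [ticker])
        else
          d.modify "equity" [] (fun l => l ++ [ticker])
      else
        d.modify "other" [] (fun l => l ++ [ticker]))
      (PySem.Dict.mk [("crypto", c), ("equity", e), ("etf", f), ("other", o)])
    = PySem.Dict.mk [("crypto", c ++ xs.filter pvPC), ("equity", e ++ xs.filter pvPEq),
                     ("etf", f ++ xs.filter pvPF), ("other", o ++ xs.filter pvPO)] := by
  induction xs with
  | nil => intro c e f o; simp
  | cons t xs ih =>
    intro c e f o
    simp only [List.foldl_cons]
    by_cases h1 : (PySem.Str.isIn "-USD" t || PySem.Str.startswith t "BTC" || PySem.Str.startswith t "ETH") = true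
    · have hc : pvPC t = true := h1
      have he : pvPEq t = false := by unfold pvPEq; rw [hc]; simp
      have hf : pvPF t = false := by unfold pvPF; rw [hc]; simp
      have ho : pvPO t = false := by unfold pvPO; rw [hc]; simp
      have hd : (PySem.Dict.mk [("crypto", c), ("equity", e), ("etf", f), ("other", o)]).modify "crypto" [] (fun l => l ++ [t])
          = PySem.Dict.mk [("crypto", c ++ [t]), ("equity", e), ("etf", f), ("other", o)] := by
        simp [PySem.Dict.modify, PySem.Dict.insert, PySem.Dict.contains, PySem.Dict.getD, PySem.Dict.get?]
      rw [if_pos h1, hd, ih]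
      simp only [List.filter_cons, hc, he, hf, ho, if_true, if_false, Bool.false_eq_true]
      simp
    · have hc : pvPC t = false := Bool.eq_false_iff.mpr h1
      by_cases h2 : (pvIsUpperStr t && decide (PySem.Str.len t ≤ 5) && !PySem.Str.isIn "-" t) = true
      · by_cases h3 : pvETFList.contains t = true
        · have he : pvPEq t = false := by unfold pvPEq; rw [h3]; simp
          have hf : pvPF t = true := by unfold pvPF; rw [hc, h2, h3]; simp
          have ho : pvPO t = false := by unfold pvPO; rw [h2]; simp
          have hd : (PySem.Dict.mk [("crypto", c), ("equity", e), ("etf", f), ("other", o)]).modify "etf" [] (fun l => l ++ [t])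
              = PySem.Dict.mk [("crypto", c), ("equity", e), ("etf", f ++ [t]), ("other", o)] := by
            simp [PySem.Dict.modify, PySem.Dict.insert, PySem.Dict.contains, PySem.Dict.getD, PySem.Dict.get?]
          rw [if_neg h1, if_pos h2, if_pos h3, hd, ih]
          simp only [List.filter_cons, hc, he, hf, ho, if_true, if_false, Bool.false_eq_true]
          simp
        · have he : pvPEq t = true := by unfold pvPEq; rw [hc, h2, Bool.eq_false_iff.mpr h3]; simp
          have hf : pvPF t = false := by unfold pvPF; rw [Bool.eq_false_iff.mpr h3]; simp
          have ho : pvPO t = false := by unfold pvPO; rw [h2]; simp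
          have hd : (PySem.Dict.mk [("crypto", c), ("equity", e), ("etf", f), ("other", o)]).modify "equity" [] (fun l => l ++ [t])
              = PySem.Dict.mk [("crypto", c), ("equity", e ++ [t]), ("etf", f), ("other", o)] := by
            simp [PySem.Dict.modify, PySem.Dict.insert, PySem.Dict.contains, PySem.Dict.getD, PySem.Dict.get?]
          rw [if_neg h1, if_pos h2, if_neg h3, hd, ih]
          simp only [List.filter_cons, hc, he, hf, ho, if_true, if_false, Bool.false_eq_true]
          simp
      · have he : pvPEq t = false := by unfold pvPEq; rw [Bool.eq_false_iff.mpr h2]; simp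
        have hf : pvPF t = false := by unfold pvPF; rw [Bool.eq_false_iff.mpr h2]; simp
        have ho : pvPO t = true := by unfold pvPO; rw [hc, Bool.eq_false_iff.mpr h2]; simp
        have hd : (PySem.Dict.mk [("crypto", c), ("equity", e), ("etf", f), ("other", o)]).modify "other" [] (fun l => l ++ [t])
            = PySem.Dict.mk [("crypto", c), ("equity", e), ("etf", f), ("other", o ++ [t])] := by
          simp [PySem.Dict.modify, PySem.Dict.insert, PySem.Dict.contains, PySem.Dict.getD, PySem.Dict.get?]
        rw [if_neg h1, if_neg h2, hd, ih]
        simp only [List.filter_cons, hc, he, hf, ho, if_true, if_false, Bool.false_eq_true]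
        simp

-- each of A's branch predicates coincides with B's key test for the matching category
lemma cat_crypto (t : String) : (pvCategory t == "crypto") = pvPC t := by
  unfold pvCategory pvPC
  by_cases h1 : (PySem.Str.isIn "-USD" t || PySem.Str.startswith t "BTC" || PySem.Str.startswith t "ETH") = true
  · rw [if_pos h1, h1]; simp
  · rw [if_neg h1, Bool.eq_false_iff.mpr h1]; split_ifs <;> simp

lemma cat_equity (t : String) : (pvCategory t == "equity") = pvPEq t := by
  unfold pvCategory pvPEq pvPC
  by_cases h1 : (PySem.Str.isIn "-USD" t || PySem.Str.startswith t "BTC" || PySem.Str.startswith t "ETH") = true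
  · rw [if_pos h1, h1]; simp
  · rw [if_neg h1, Bool.eq_false_iff.mpr h1]
    by_cases h2 : (pvIsUpperStr t && decide (PySem.Str.len t ≤ 5) && !PySem.Str.isIn "-" t) = true
    · rw [if_pos h2, h2]
      by_cases h3 : pvETFList.contains t = true
      · rw [if_pos h3, h3]; simp
      · rw [if_neg h3, Bool.eq_false_iff.mpr h3]; simp
    · rw [if_neg h2, Bool.eq_false_iff.mpr h2]; simp

lemma cat_etf (t : String) : (pvCategory t == "etf") = pvPF t := by
  unfold pvCategory pvPF pvPC
  by_cases h1 : (PySem.Str.isIn "-USD" t || PySem.Str.startswith t "BTC" || PySem.Str.startswith t "ETH") = true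
  · rw [if_pos h1, h1]; simp
  · rw [if_neg h1, Bool.eq_false_iff.mpr h1]
    by_cases h2 : (pvIsUpperStr t && decide (PySem.Str.len t ≤ 5) && !PySem.Str.isIn "-" t) = true
    · rw [if_pos h2, h2]
      by_cases h3 : pvETFList.contains t = true
      · rw [if_pos h3, h3]; simp
      · rw [if_neg h3, Bool.eq_false_iff.mpr h3]; simp
    · rw [if_neg h2, Bool.eq_false_iff.mpr h2]; simp

lemma cat_other (t : String) : (pvCategory t == "other") = pvPO t := by
  unfold pvCategory pvPO pvPC
  by_cases h1 : (PySem.Str.isIn "-USD" t || PySem.Str.startswith t "BTC" || PySem.Str.startswith t "ETH") = true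
  · rw [if_pos h1, h1]; simp
  · rw [if_neg h1, Bool.eq_false_iff.mpr h1]
    by_cases h2 : (pvIsUpperStr t && decide (PySem.Str.len t ≤ 5) && !PySem.Str.isIn "-" t) = true
    · rw [if_pos h2, h2]; split_ifs <;> simp
    · rw [if_neg h2, Bool.eq_false_iff.mpr h2]; simp

-- ===== VERDICT (by name: the statement is the Claim_ definition above) =====
theorem categorize_missing_tickers_spec : Claim_equal_categorize_missing_tickers := by
  intro missing _
  unfold Spec_categorize_missing_tickers
  simp only [categorize_missing_tickers, categorize_missing_tickers_alt]
  have hinit : ((((PySem.Dict.empty).insert "crypto" ([] : List String)).insert "equity" []).insert "etf" []).insert "other" []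
      = PySem.Dict.mk [("crypto", []), ("equity", []), ("etf", []), ("other", [])] := by
    decide
  rw [hinit, loopA]
  simp only [PySem.Dict.keys, List.map, List.foldl]
  -- evaluate the four modify steps of the sorting loop on the literal dict
  simp only [PySem.Dict.modify, PySem.Dict.insert, PySem.Dict.contains, PySem.Dict.getD,
    PySem.Dict.get?]
  simp only [List.filter_congr (fun t _ => cat_crypto t), List.filter_congr (fun t _ => cat_equity t),
    List.filter_congr (fun t _ => cat_etf t), List.filter_congr (fun t _ => cat_other t)]
  simp
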